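-- pv_equiv track=rewrite | github.com/Madhu733/Python | stringsN (1).py | isdigit1
-- ===== SOURCE A (Python) =====
-- def isdigit1(d):
--     n=0
--     for i in d:
--         if ord(i)>=33 and ord(i)<=64:
--             n+=1
--         else:
--             continue
--     if n==len(d):
--         return True
--     else:
--         return False
-- ===== SOURCE B (Python) =====
-- def isdigit1(d):
--     # All chars have codes in 33..64 iff the string is empty or its extremal
--     # characters are within ['!', '@']: two reductions instead of a per-char test.
--     return d == "" or ('!' <= min(d) and max(d) <= '@')
-- ===== Notes on version B (the rewrite author's own statement) =====
-- stated objective: alternative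
-- what changed: Replaces A's per-character ord-test counting loop (count == len) by two extremal reductions: compute min(d) and max(d) and check the interval bounds '!' <= min and max <= '@' (empty string trivially True).
import Mathlib
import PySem

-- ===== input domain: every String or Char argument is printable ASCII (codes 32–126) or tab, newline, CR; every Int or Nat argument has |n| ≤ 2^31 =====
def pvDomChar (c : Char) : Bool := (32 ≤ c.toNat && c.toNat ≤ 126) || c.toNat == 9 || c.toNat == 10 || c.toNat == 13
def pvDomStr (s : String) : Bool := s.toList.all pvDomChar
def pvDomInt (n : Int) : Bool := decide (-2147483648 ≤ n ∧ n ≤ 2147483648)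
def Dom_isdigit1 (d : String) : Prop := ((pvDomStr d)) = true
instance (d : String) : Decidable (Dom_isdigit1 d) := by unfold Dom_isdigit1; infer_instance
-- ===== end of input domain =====

-- B checks the interval bounds on min(d) and max(d) (two extremal reductions)
-- instead of A's per-character counting loop; same O(n) cost.

-- ===== PORT A =====
def isdigit1 (d : String) : Bool :=
  let n : Int := d.toList.foldl
    (fun n i => if (i.toNat : Int) ≥ 33 ∧ (i.toNat : Int) ≤ 64 then n + 1 else n) 0
  if n = PySem.Str.len d then true else false

-- ===== PORT B =====
def isdigit1_alt (d : String) : Bool :=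
  if d = "" then true
  else
    match PySem.List.min? d.toList (fun c => c), PySem.List.max? d.toList (fun c => c) with
    | some m, some M => decide ('!' ≤ m) && decide (M ≤ '@')
    | _, _ => false

-- ===== PRECONDITION & SPEC =====
def Spec_isdigit1 (d : String) (out : Bool) : Prop := out = isdigit1_alt d
instance (d : String) (out : Bool) : Decidable (Spec_isdigit1 d out) := by unfold Spec_isdigit1; infer_instance

-- ===== CLAIM (what is proved, stated in full; the proofs are below) =====
def Claim_equal_isdigit1 : Prop := ∀ (d : String), Dom_isdigit1 d → Spec_isdigit1 d (isdigit1 d)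

-- ===== LEMMAS AND PROOFS =====

theorem pv_foldl_le (l : List Char) (n : Int) :
    l.foldl (fun n i => if (i.toNat : Int) ≥ 33 ∧ (i.toNat : Int) ≤ 64 then n + 1 else n) n
      ≤ n + l.length := by
  induction l generalizing n with
  | nil => simp
  | cons c l ih =>
    simp only [List.foldl_cons, List.length_cons]
    split_ifs with h
    · have := ih (n + 1); omega
    · have := ih n; omega

theorem pv_foldl_eq_iff (l : List Char) (n : Int) :
    (l.foldl (fun n i => if (i.toNat : Int) ≥ 33 ∧ (i.toNat : Int) ≤ 64 then n + 1 else n) n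
       = n + l.length)
    ↔ ∀ c ∈ l, 33 ≤ c.toNat ∧ c.toNat ≤ 64 := by
  induction l generalizing n with
  | nil => simp
  | cons c l ih =>
    simp only [List.foldl_cons, List.length_cons, List.mem_cons]
    split_ifs with h
    · constructor
      · intro he x hx
        rcases hx with rfl | hx
        · omega
        · exact ((ih (n + 1)).mp (by omega)) x hx
      · intro hall
        have := (ih (n + 1)).mpr (fun x hx => hall x (Or.inr hx))
        omega
    · constructor
      · intro he
        have := pv_foldl_le l n
        omega
      · intro hall
        exact absurd (hall c (Or.inl rfl)) (by omega)

theorem pv_char_le_iff (a b : Char) : a ≤ b ↔ a.toNat ≤ b.toNat := by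
  rfl

-- ===== VERDICT (by name: the statement is the Claim_ definition above) =====
theorem isdigit1_spec : Claim_equal_isdigit1 := by
  intro d _
  unfold Spec_isdigit1 isdigit1 isdigit1_alt
  simp only [PySem.Str.len]
  have key := pv_foldl_eq_iff d.toList 0
  rw [zero_add] at key
  by_cases hemp : d = ""
  · subst hemp; decide
  · rw [if_neg hemp]
    have hne : d.toList ≠ [] := by
      intro h
      apply hemp
      have : d.toList = "".toList := by simpa using h
      exact String.toList_inj.mp this
    obtain ⟨m, hm⟩ : ∃ m, PySem.List.min? d.toList (fun c => c) = some m := by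
      cases h : PySem.List.min? d.toList (fun c => c) with
      | none => exact absurd ((PySem.List.min?_eq_none_iff (xs := d.toList) (key := fun c => c)).mp h) hne
      | some m => exact ⟨m, rfl⟩
    obtain ⟨M, hM⟩ : ∃ M, PySem.List.max? d.toList (fun c => c) = some M := by
      cases h : PySem.List.max? d.toList (fun c => c) with
      | none => exact absurd ((PySem.List.max?_eq_none_iff (xs := d.toList) (key := fun c => c)).mp h) hne
      | some M => exact ⟨M, rfl⟩
    rw [hm, hM]
    have hmmem := PySem.List.min?_mem hm
    have hMmem := PySem.List.max?_mem hM
    have hmin := PySem.List.min?_isMin hm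
    have hmax := PySem.List.max?_isMax hM
    by_cases hall : ∀ c ∈ d.toList, 33 ≤ c.toNat ∧ c.toNat ≤ 64
    · rw [if_pos (key.mpr hall)]
      have h1 : ('!' : Char) ≤ m := by
        rw [pv_char_le_iff]
        have := (hall m hmmem).1
        simpa using this
      have h2 : M ≤ ('@' : Char) := by
        rw [pv_char_le_iff]
        have := (hall M hMmem).2
        simpa using this
      simp [h1, h2]
    · rw [if_neg (fun he => hall (key.mp he))]
      symm
      by_contra hb
      rw [Bool.not_eq_false, Bool.and_eq_true, decide_eq_true_iff, decide_eq_true_iff,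
        pv_char_le_iff, pv_char_le_iff] at hb
      obtain ⟨h1, h2⟩ := hb
      apply hall
      intro c hc
      have hlo := hmin c hc
      have hhi := hmax c hc
      rw [pv_char_le_iff] at hlo hhi
      constructor
      · calc (33 : ℕ) = ('!' : Char).toNat := by decide
          _ ≤ m.toNat := h1
          _ ≤ c.toNat := hlo
      · calc c.toNat ≤ M.toNat := hhi
          _ ≤ ('@' : Char).toNat := h2
          _ = 64 := by decide
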